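-- pv_equiv track=rewrite | github.com/meghanahonnalli16-svg/Meghana-Honnalli | warehouse_inventory_robot (1).py | bucket_sort_by_zone
-- ===== SOURCE A (Python) =====
-- ZONES = ["A", "B", "C", "D"]
--
-- def bucket_sort_by_zone(inventory: list) -> dict:
--     """
--     Bucket-sort items by warehouse zone (A, B, C, D).
--     Returns a dict { zone: [items...] } sorted by PickPriority desc within each bucket.
--     """
--     buckets = {zone: [] for zone in ZONES}
--
--     for item in inventory:
--         zone = item[1][0]           # first character of Location is the zone letter
--         buckets[zone].append(item)
--
--     # Sort each bucket by PickPriority (index 4) descending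
--     for zone in buckets:
--         buckets[zone].sort(key=lambda x: x[4], reverse=True)
--
--     return buckets
-- ===== SOURCE B (Python) =====
-- ZONES = ["A", "B", "C", "D"]
--
-- def bucket_sort_by_zone(inventory: list) -> dict:
--     return {
--         zone: sorted((it for it in inventory if it[1][0] == zone),
--                      key=lambda x: x[4], reverse=True)
--         for zone in ZONES
--     }
-- ===== Notes on version B (the rewrite author's own statement) =====
-- stated objective: simpler
-- what changed: B replaces A's mutable dict bucketing pass plus per-bucket in-place sort by a single per-zone dict comprehension: for each of the four zones it filters the inventory and sorts that selection once, never building or mutating an intermediate dict.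
import Mathlib
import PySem

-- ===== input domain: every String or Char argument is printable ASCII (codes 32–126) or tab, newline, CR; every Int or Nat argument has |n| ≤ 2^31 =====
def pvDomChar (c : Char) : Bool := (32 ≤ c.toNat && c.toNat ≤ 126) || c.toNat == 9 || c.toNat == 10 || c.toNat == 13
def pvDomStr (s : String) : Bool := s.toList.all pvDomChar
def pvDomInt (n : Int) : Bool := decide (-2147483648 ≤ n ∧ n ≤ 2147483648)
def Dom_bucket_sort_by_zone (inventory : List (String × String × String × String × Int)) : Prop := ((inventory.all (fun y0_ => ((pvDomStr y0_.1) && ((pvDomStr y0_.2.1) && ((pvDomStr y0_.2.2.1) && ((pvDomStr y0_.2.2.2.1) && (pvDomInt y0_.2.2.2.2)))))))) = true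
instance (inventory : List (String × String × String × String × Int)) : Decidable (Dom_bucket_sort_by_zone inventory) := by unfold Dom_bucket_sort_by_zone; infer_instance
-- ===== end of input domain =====

-- B is simpler: a per-zone dict comprehension (filter then sort each selection once)
-- replaces A's mutable dict bucketing pass plus per-bucket in-place sort.

-- module constant ZONES, shared by both Pythons
def pvZONES : List String := ["A", "B", "C", "D"]

-- item[1][0] as a one-character string (the dict key / comparison value); '""' is the
-- unreachable IndexError case, excluded by Pre_ below
def pvZoneOf (it : String × String × String × String × Int) : String :=
  match PySem.Str.pyGet? it.2.1 0 with
  | some c => String.ofList [c]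
  | none => ""

-- ===== PORT A =====
def bucket_sort_by_zone (inventory : List (String × String × String × String × Int)) : List (String × List (String × String × String × String × Int)) :=
  -- buckets = {zone: [] for zone in ZONES}
  let buckets : PySem.Dict String (List (String × String × String × String × Int)) :=
    pvZONES.foldl (fun d z => d.insert z []) PySem.Dict.empty
  -- for item in inventory: buckets[item[1][0]].append(item)   (KeyError outside Pre_)
  let buckets := inventory.foldl (fun d it => d.modify (pvZoneOf it) [] (fun l => l ++ [it])) buckets
  -- for zone in buckets: buckets[zone].sort(key=lambda x: x[4], reverse=True)
  buckets.items.map (fun p => (p.1, PySem.List.sorted p.2 (fun x => x.2.2.2.2) true))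

-- ===== PORT B =====
def bucket_sort_by_zone_alt (inventory : List (String × String × String × String × Int)) : List (String × List (String × String × String × String × Int)) :=
  -- {zone: sorted((it for it in inventory if it[1][0] == zone), key=…, reverse=True) for zone in ZONES}
  pvZONES.map (fun zone =>
    (zone, PySem.List.sorted (inventory.filter (fun it => pvZoneOf it == zone)) (fun x => x.2.2.2.2) true))

-- ===== PRECONDITION & SPEC =====
-- Pre_ excludes exactly the inputs where the Python A raises: an item whose Location is empty
-- (IndexError on item[1][0]) or whose first Location character is not a zone letter
-- (KeyError on buckets[zone]).
def Pre_bucket_sort_by_zone (inventory : List (String × String × String × String × Int)) : Prop :=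
  ∀ it ∈ inventory, PySem.Str.pyGet? it.2.1 0 ∈ ([some 'A', some 'B', some 'C', some 'D'] : List (Option Char))
instance (inventory : List (String × String × String × String × Int)) : Decidable (Pre_bucket_sort_by_zone inventory) := by unfold Pre_bucket_sort_by_zone; infer_instance

def pvWitness_bucket_sort_by_zone : (List (String × String × String × String × Int)) :=
  [("w1", "A1", "x", "y", 5), ("w2", "B2", "x", "y", 3), ("w3", "A7", "x", "y", 5)]

def Spec_bucket_sort_by_zone (inventory : List (String × String × String × String × Int)) (out : List (String × List (String × String × String × String × Int))) : Prop := out = bucket_sort_by_zone_alt inventory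
instance (inventory : List (String × String × String × String × Int)) (out : List (String × List (String × String × String × String × Int))) : Decidable (Spec_bucket_sort_by_zone inventory out) := by
  unfold Spec_bucket_sort_by_zone
  letI hE : DecidableEq (List (String × String × String × String × Int)) := fun a b => List.hasDecEq a b
  letI hP : DecidableEq (String × List (String × String × String × String × Int)) := fun a b => instDecidableEqProd a b
  exact List.hasDecEq out (bucket_sort_by_zone_alt inventory)

-- ===== CLAIM (what is proved, stated in full; the proofs are below) =====
def Claim_equal_bucket_sort_by_zone : Prop := ∀ (inventory : List (String × String × String × String × Int)), Dom_bucket_sort_by_zone inventory → Pre_bucket_sort_by_zone inventory → Spec_bucket_sort_by_zone inventory (bucket_sort_by_zone inventory)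

-- ===== LEMMAS AND PROOFS =====

-- the initial 4-key dict
theorem pv_init_dict :
    (pvZONES.foldl (fun d z => d.insert z ([] : List (String × String × String × String × Int))) PySem.Dict.empty) =
      ⟨[("A", []), ("B", []), ("C", []), ("D", [])]⟩ := by
  decide

-- the bucketing fold on the fixed 4-key dict produces the four zone filters
theorem pv_fold4 (inv : List (String × String × String × String × Int))
    (h : ∀ it ∈ inv, pvZoneOf it ∈ pvZONES)
    (la lb lc ld : List (String × String × String × String × Int)) :
    (inv.foldl (fun d it => d.modify (pvZoneOf it) [] (fun l => l ++ [it]))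
        (⟨[("A", la), ("B", lb), ("C", lc), ("D", ld)]⟩ : PySem.Dict String (List (String × String × String × String × Int)))).items =
      [("A", la ++ inv.filter (fun it => pvZoneOf it == "A")),
       ("B", lb ++ inv.filter (fun it => pvZoneOf it == "B")),
       ("C", lc ++ inv.filter (fun it => pvZoneOf it == "C")),
       ("D", ld ++ inv.filter (fun it => pvZoneOf it == "D"))] := by
  induction inv generalizing la lb lc ld with
  | nil => simp
  | cons it rest ih =>
    have hz := h it List.mem_cons_self
    have hrest : ∀ x ∈ rest, pvZoneOf x ∈ pvZONES := fun x hx => h x (List.mem_cons_of_mem _ hx)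
    simp only [pvZONES, List.mem_cons, List.not_mem_nil, or_false] at hz
    rcases hz with hz | hz | hz | hz <;>
    · rw [List.foldl_cons]
      have hstep : (⟨[("A", la), ("B", lb), ("C", lc), ("D", ld)]⟩ : PySem.Dict String (List (String × String × String × String × Int))).modify (pvZoneOf it) [] (fun l => l ++ [it]) =
          ⟨[("A", if pvZoneOf it == "A" then la ++ [it] else la),
            ("B", if pvZoneOf it == "B" then lb ++ [it] else lb),
            ("C", if pvZoneOf it == "C" then lc ++ [it] else lc),
            ("D", if pvZoneOf it == "D" then ld ++ [it] else ld)]⟩ := by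
        rw [hz]
        simp [PySem.Dict.modify, PySem.Dict.insert, PySem.Dict.contains, PySem.Dict.getD, PySem.Dict.get?]
      rw [hstep, ih hrest]
      simp [hz, List.append_assoc]

-- ===== VERDICT (by name: the statement is the Claim_ definition above) =====
theorem bucket_sort_by_zone_spec : Claim_equal_bucket_sort_by_zone := by
  intro inv _ hpre
  unfold Spec_bucket_sort_by_zone bucket_sort_by_zone bucket_sort_by_zone_alt
  have hz : ∀ it ∈ inv, pvZoneOf it ∈ pvZONES := by
    intro it hit
    have := hpre it hit
    simp only [List.mem_cons, List.not_mem_nil, or_false] at this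
    unfold pvZoneOf
    rcases this with h | h | h | h <;> rw [h] <;> simp [pvZONES]
  rw [pv_init_dict]
  simp only [pv_fold4 inv hz, List.map, List.nil_append, pvZONES]
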